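-- pv_equiv track=rewrite | github.com/johntooth/crawl4ai | tests/exhaustive/test_comprehensive_exhaustive_crawling.py | create_deep_tree_structure
-- ===== SOURCE A (Python) =====
-- from typing import List, Dict, Any
--
-- def create_deep_tree_structure(base_url: str, depth: int = 3, branching_factor: int = 3) -> Dict[str, List[str]]:
--     """Create a deep tree structure with specified depth and branching factor."""
--     structure = {}
--
--     def build_tree(current_url: str, current_depth: int):
--         if current_depth >= depth:
--             structure[current_url] = []
--             return
--
--         children = []
--         for i in range(branching_factor):
--             child_url = f"{current_url}/child{i}"
--             children.append(child_url)
--             build_tree(child_url, current_depth + 1)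
--
--         structure[current_url] = children
--
--     build_tree(base_url, 0)
--     return structure
-- ===== SOURCE B (Python) =====
-- def create_deep_tree_structure(base_url: str, depth: int = 3, branching_factor: int = 3):
--     """Create a deep tree structure with specified depth and branching factor."""
--     items = []
--     stack = [(base_url, depth)]
--     while stack:
--         url, remaining = stack.pop()
--         if remaining <= 0:
--             items.append((url, []))
--         elif remaining == 1:
--             # children are leaves: emit them directly instead of a stack round-trip
--             children = [f"{url}/child{i}" for i in range(branching_factor)]
--             items.append((url, children))
--             for child in reversed(children):
--                 items.append((child, []))
--         else:
--             children = [f"{url}/child{i}" for i in range(branching_factor)]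
--             items.append((url, children))
--             for child in children:
--                 stack.append((child, remaining - 1))
--     return dict(reversed(items))
-- ===== Notes on version B (the rewrite author's own statement) =====
-- stated objective: alternative
-- what changed: Replaced A's recursive closure that mutates a shared dict with an iterative explicit-stack (worklist) traversal carrying a remaining-depth counter (leaf children are emitted directly instead of a stack round-trip), collecting (url, children) items in pop order and building the dict once from the reversed item list.
import Mathlib
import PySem

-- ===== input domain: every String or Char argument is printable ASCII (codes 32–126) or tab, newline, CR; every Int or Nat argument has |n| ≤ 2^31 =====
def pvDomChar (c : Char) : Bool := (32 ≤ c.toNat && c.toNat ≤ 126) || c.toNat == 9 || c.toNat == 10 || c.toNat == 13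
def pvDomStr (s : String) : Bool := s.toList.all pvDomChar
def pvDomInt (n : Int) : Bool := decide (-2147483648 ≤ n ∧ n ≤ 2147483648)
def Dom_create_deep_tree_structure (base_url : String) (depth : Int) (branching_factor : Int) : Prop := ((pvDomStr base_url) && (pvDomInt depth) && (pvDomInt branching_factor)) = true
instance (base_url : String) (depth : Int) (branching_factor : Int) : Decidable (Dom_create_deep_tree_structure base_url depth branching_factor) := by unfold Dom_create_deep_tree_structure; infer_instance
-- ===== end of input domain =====

-- B replaces A's recursive closure by an explicit worklist stack with a "remaining depth"
-- counter, collecting the items and building the dict once at the end (objective: alternative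
-- decomposition; same asymptotic cost).

-- ===== PORT A =====
-- Python's inner recursion `build_tree(current_url, current_depth)` stops when
-- current_depth >= depth; the port carries fuel = (depth - current_depth).toNat, so the
-- stop test `current_depth >= depth` is exactly `fuel = 0`. The mutable dict `structure`
-- is threaded as state; the `for i in range(branching_factor)` loop is the foldl over
-- PySem.List.pyRange carrying the pair (children, structure).
def pvBuildTreeA (bf : Int) : Nat → String → PySem.Dict String (List String) → PySem.Dict String (List String)
  | 0, url, st => st.insert url []
  | k+1, url, st =>
    let res := (PySem.List.pyRange 0 bf 1).foldl
      (fun (acc : List String × PySem.Dict String (List String)) i =>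
        let child := url ++ "/child" ++ PySem.Int.toStr i
        (acc.1 ++ [child], pvBuildTreeA bf k child acc.2)) ([], st)
    res.2.insert url res.1

def create_deep_tree_structure (base_url : String) (depth : Int) (branching_factor : Int) : List (String × List String) :=
  (pvBuildTreeA branching_factor depth.toNat base_url PySem.Dict.empty).items

-- ===== PORT B =====
-- termination measure for the worklist loop: total node count of the pending subtrees
def pvNodes (b : Nat) : Nat → Nat
  | 0 => 1
  | k+1 => 1 + b * pvNodes b k

-- Source B's `while stack` loop; Python pops from / appends to the END of the list, modelled
-- here with the head as the top of the stack (children are pushed reversed onto the front,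
-- which is exactly appending them in order and popping the last first); when the children
-- are leaves (remaining == 1) they are emitted directly, in the reversed pop order.
def pvLoopB (bf : Int) (stack : List (String × Int)) (items : List (String × List String)) : List (String × List String) :=
  match stack with
  | [] => items
  | (url, remaining) :: rest =>
    if remaining ≤ 0 then
      pvLoopB bf rest (items ++ [(url, [])])
    else if remaining = 1 then
      let children := (PySem.List.pyRange 0 bf 1).map (fun i => url ++ "/child" ++ PySem.Int.toStr i)
      pvLoopB bf rest ((items ++ [(url, children)]) ++ children.reverse.map (fun c => (c, [])))
    else
      let children := (PySem.List.pyRange 0 bf 1).map (fun i => url ++ "/child" ++ PySem.Int.toStr i)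
      pvLoopB bf ((children.map (fun c => (c, remaining - 1))).reverse ++ rest) (items ++ [(url, children)])
termination_by (stack.map (fun p => pvNodes bf.toNat p.2.toNat)).sum
decreasing_by
  · simp only [List.map_cons, List.sum_cons]
    have h1 : 1 ≤ pvNodes bf.toNat remaining.toNat := by
      cases h : remaining.toNat <;> simp [pvNodes]
    omega
  · simp only [List.map_cons, List.sum_cons]
    have h1 : 1 ≤ pvNodes bf.toNat remaining.toNat := by
      cases h : remaining.toNat <;> simp [pvNodes]
    omega
  · simp only [List.map_append, List.sum_append, List.map_cons, List.sum_cons,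
      List.map_reverse, List.sum_reverse, List.map_map]
    rw [show ((fun (p : String × Int) => pvNodes bf.toNat p.2.toNat) ∘
        (fun (c : String) => (c, remaining - 1)) ∘ (fun (i : Int) => url ++ "/child" ++ PySem.Int.toStr i))
        = (fun (_ : Int) => pvNodes bf.toNat (remaining - 1).toNat) from rfl]
    rw [List.map_const', List.sum_replicate, smul_eq_mul]
    have hlen2 : (PySem.List.pyRange 0 bf 1).length = bf.toNat := by
      simp [PySem.List.length_pyRange_one]
    rw [hlen2]
    have hr : remaining.toNat = (remaining - 1).toNat + 1 := by omega
    rw [hr]; simp only [pvNodes]; omega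

def create_deep_tree_structure_alt (base_url : String) (depth : Int) (branching_factor : Int) : List (String × List String) :=
  (PySem.Dict.ofList ((pvLoopB branching_factor [(base_url, depth)] []).reverse) : PySem.Dict String (List String)).items

-- ===== PRECONDITION & SPEC =====
-- Pre_ excludes depth > 900 when branching_factor ≥ 1: there A's recursion is depth+1 frames
-- deep and raises RecursionError once CPython's recursion limit (default 1000) is reached;
-- the margin below the limit is excluded too because whether A returns there depends on the
-- interpreter's current stack state, not on the input.
def Pre_create_deep_tree_structure (base_url : String) (depth : Int) (branching_factor : Int) : Prop :=
  branching_factor ≤ 0 ∨ depth ≤ 900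
instance (base_url : String) (depth : Int) (branching_factor : Int) : Decidable (Pre_create_deep_tree_structure base_url depth branching_factor) := by unfold Pre_create_deep_tree_structure; infer_instance
def pvWitness_create_deep_tree_structure : String × Int × Int := ("b", 2, 2)
def Spec_create_deep_tree_structure (base_url : String) (depth : Int) (branching_factor : Int) (out : List (String × List String)) : Prop := out = create_deep_tree_structure_alt base_url depth branching_factor
instance (base_url : String) (depth : Int) (branching_factor : Int) (out : List (String × List String)) : Decidable (Spec_create_deep_tree_structure base_url depth branching_factor out) := by unfold Spec_create_deep_tree_structure; infer_instance

-- ===== CLAIM (what is proved, stated in full; the proofs are below) =====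
def Claim_equal_create_deep_tree_structure : Prop := ∀ (base_url : String) (depth : Int) (branching_factor : Int), Dom_create_deep_tree_structure base_url depth branching_factor → Pre_create_deep_tree_structure base_url depth branching_factor → Spec_create_deep_tree_structure base_url depth branching_factor (create_deep_tree_structure base_url depth branching_factor)

-- ===== LEMMAS AND PROOFS =====

-- the postorder item list both programs produce
def pvPost (bf : Int) : Nat → String → List (String × List String)
  | 0, url => [(url, [])]
  | k+1, url =>
    let children := (PySem.List.pyRange 0 bf 1).map (fun i => url ++ "/child" ++ PySem.Int.toStr i)
    (children.map (pvPost bf k)).flatten ++ [(url, children)]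

theorem pvDict_update_append {κ ν : Type} [BEq κ] (d : PySem.Dict κ ν) (xs ys : List (κ × ν)) :
    d.update (xs ++ ys) = (d.update xs).update ys := by
  simp [PySem.Dict.update, List.foldl_append]

-- A's recursion performs exactly the inserts of the postorder list, in order
theorem pvBuildTreeA_eq_update (bf : Int) (fuel : Nat) (url : String)
    (st : PySem.Dict String (List String)) :
    pvBuildTreeA bf fuel url st = st.update (pvPost bf fuel url) := by
  induction fuel generalizing url st with
  | zero => simp [pvBuildTreeA, pvPost, PySem.Dict.update]
  | succ k ih =>
    rw [pvBuildTreeA, pvPost]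
    rw [PySem.List.foldl_prod_mk
      (fun (l : List String) (i : Int) => l ++ [url ++ "/child" ++ PySem.Int.toStr i])
      (fun (st : PySem.Dict String (List String)) (i : Int) => pvBuildTreeA bf k (url ++ "/child" ++ PySem.Int.toStr i) st)]
    have hfold : ∀ (l : List Int) (d : PySem.Dict String (List String)),
        l.foldl (fun d i => pvBuildTreeA bf k (url ++ "/child" ++ PySem.Int.toStr i) d) d
          = d.update (((l.map (fun i => url ++ "/child" ++ PySem.Int.toStr i)).map (pvPost bf k)).flatten) := by
      intro l
      induction l with
      | nil => intro d; simp [PySem.Dict.update]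
      | cons x xs ihl =>
        intro d
        simp only [List.foldl_cons, List.map_cons, List.flatten_cons]
        rw [ih, ihl, ← pvDict_update_append]
    simp only [hfold, PySem.List.foldl_append_singleton_eq_map, List.nil_append]
    rw [pvDict_update_append]
    simp [PySem.Dict.update]

-- B's worklist loop appends, per pending subtree, the reverse of its postorder list
theorem pvLoopB_eq (bf : Int) (stack : List (String × Int)) (items : List (String × List String)) :
    pvLoopB bf stack items
      = items ++ (stack.map (fun p => (pvPost bf p.2.toNat p.1).reverse)).flatten := by
  induction stack, items using pvLoopB.induct bf with
  | case1 items => rw [pvLoopB]; simp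
  | case2 items url remaining rest hle ih =>
    rw [pvLoopB]
    simp only [hle, if_true]
    rw [ih]
    have h0 : remaining.toNat = 0 := by omega
    simp [h0, pvPost]
  | case3 items url rest children hle ih =>
    rw [pvLoopB]
    simp only [show ¬(1:Int) ≤ 0 by norm_num, if_false, if_true]
    rw [ih]
    simp [pvPost, show ((1:Int)).toNat = 1 from rfl, List.reverse_append, List.map_reverse,
      List.map_map, Function.comp_def, List.append_assoc]
    have hc : children = List.map (fun i => url ++ "/child" ++ PySem.Int.toStr i) (PySem.List.pyRange 0 bf 1) := rfl
    refine ⟨hc, ?_⟩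
    rw [hc, List.map_map]
    induction PySem.List.pyRange 0 bf 1 with
    | nil => simp
    | cons x xs ihx => simp_all
  | case4 items url remaining rest hle h1 children ih =>
    rw [pvLoopB]
    simp only [hle, if_false, h1, if_false]
    rw [ih]
    have hr : remaining.toNat = (remaining - 1).toNat + 1 := by omega
    conv_rhs => rw [List.map_cons, List.flatten_cons, hr]
    simp only [pvPost]
    simp [List.reverse_append, List.reverse_flatten, List.map_map, List.map_reverse,
      Function.comp_def, List.append_assoc]
    have hc : children = List.map (fun i => url ++ "/child" ++ PySem.Int.toStr i) (PySem.List.pyRange 0 bf 1) := rfl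
    exact ⟨hc, by rw [hc, List.map_map]; rfl⟩

-- ===== VERDICT (by name: the statement is the Claim_ definition above) =====
theorem create_deep_tree_structure_spec : Claim_equal_create_deep_tree_structure := by
  intro base_url depth bf hdom hpre
  unfold Spec_create_deep_tree_structure
  unfold create_deep_tree_structure create_deep_tree_structure_alt
  rw [pvBuildTreeA_eq_update, pvLoopB_eq]
  simp_all [PySem.Dict.ofList]
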